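-- pv_equiv track=rewrite | github.com/afrin1308/VRV-Security-s-Python-Intern-Assignment-LogAnalysis | log_analysis.py | detect_suspicious_activity
-- ===== SOURCE A (Python) =====
-- from collections import Counter
--
-- def detect_suspicious_activity(log_entries, threshold=10):
--     failed_login_counter = Counter()
--     for line in log_entries:
--         # Check for failed login attempts (HTTP status code 401 or "Invalid credentials")
--         if '401' in line or 'Invalid credentials' in line:
--             parts = line.split()
--             ip_address = parts[0]
--             failed_login_counter[ip_address] += 1
--
--     # Filter out IP addresses that have failed attempts above the threshold
--     suspicious_ips = {ip: count for ip, count in failed_login_counter.items() if count > threshold}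
--     return suspicious_ips
-- ===== SOURCE B (Python) =====
-- def detect_suspicious_activity(log_entries, threshold=10):
--     # Sort-then-group counting instead of a hash Counter:
--     # Stage 1: collect the source IP of every failed-login line.
--     hits = [line.split()[0] for line in log_entries
--             if '401' in line or 'Invalid credentials' in line]
--     # Stage 2: sort the IPs; equal IPs become adjacent, so one linear scan
--     # over the sorted list yields each distinct IP with its run length.
--     runs = []  # (ip, run length), one entry per distinct ip
--     for ip in sorted(hits):
--         if runs and runs[-1][0] == ip:
--             runs[-1] = (ip, runs[-1][1] + 1)
--         else:
--             runs.append((ip, 1))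
--     counts = dict(runs)
--     # Stage 3: emit, in first-occurrence order, the IPs whose count exceeds
--     # the threshold (matches the insertion order of A's result dict).
--     out = {}
--     for ip in hits:
--         if ip not in out and counts[ip] > threshold:
--             out[ip] = counts[ip]
--     return out
-- ===== Notes on version B (the rewrite author's own statement) =====
-- stated objective: alternative
-- what changed: B replaces A's hash Counter with sort-then-group counting: it collects the matching IPs, sorts them so equal IPs are adjacent, counts each run in one linear scan, and then emits the over-threshold IPs in first-occurrence order.
import Mathlib
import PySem

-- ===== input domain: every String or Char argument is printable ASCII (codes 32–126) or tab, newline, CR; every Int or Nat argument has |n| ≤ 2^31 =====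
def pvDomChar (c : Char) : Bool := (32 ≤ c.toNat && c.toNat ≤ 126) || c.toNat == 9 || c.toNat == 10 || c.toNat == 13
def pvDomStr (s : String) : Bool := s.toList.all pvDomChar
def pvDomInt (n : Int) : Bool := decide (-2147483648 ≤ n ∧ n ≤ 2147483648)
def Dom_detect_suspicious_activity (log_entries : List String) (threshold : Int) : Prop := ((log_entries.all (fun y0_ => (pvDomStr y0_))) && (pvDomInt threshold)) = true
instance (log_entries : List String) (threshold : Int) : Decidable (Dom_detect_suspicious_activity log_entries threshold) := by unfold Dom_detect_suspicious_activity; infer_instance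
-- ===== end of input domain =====

-- B counts failed-login IPs by sort-then-group run scanning instead of A's hash Counter
-- (objective: alternative; not measured faster).

-- shared helpers: the failed-login test and `line.split()[0]`.
-- `parts[0]` cannot raise: a matching line contains '401' or 'Invalid credentials',
-- hence a non-whitespace character, so `line.split()` is nonempty and headD "" is exact there.
def pvIsFailed (line : String) : Bool :=
  PySem.Str.isIn "401" line || PySem.Str.isIn "Invalid credentials" line

def pvFirstToken (line : String) : String := (PySem.Str.split₀ line).headD ""

-- ===== PORT A =====
def detect_suspicious_activity (log_entries : List String) (threshold : Int) : List (String × Int) :=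
  -- failed_login_counter = Counter(); for line in log_entries: if …: failed_login_counter[parts[0]] += 1
  let failed_login_counter : PySem.Dict String Int :=
    log_entries.foldl
      (fun d line => if pvIsFailed line then d.modify (pvFirstToken line) 0 (· + 1) else d)
      PySem.Dict.empty
  -- suspicious_ips = {ip: count for ip, count in failed_login_counter.items() if count > threshold}
  (failed_login_counter.items.foldl
      (fun r p => if p.2 > threshold then r.insert p.1 p.2 else r)
      (PySem.Dict.empty : PySem.Dict String Int)).items

-- ===== PORT B =====
-- the body of B's stage-2 loop; `runs` is kept REVERSED (head = Python's runs[-1])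
def pvRun (rs : List (String × Int)) (ip : String) : List (String × Int) :=
  match rs with
  | [] => [(ip, 1)]                                    -- runs empty: runs.append((ip, 1))
  | (p, c) :: rest =>                                  -- (p, c) = runs[-1]
      if p = ip then (p, c + 1) :: rest                -- runs[-1] = (ip, c + 1)
      else (ip, 1) :: (p, c) :: rest                   -- runs.append((ip, 1))

def detect_suspicious_activity_alt (log_entries : List String) (threshold : Int) : List (String × Int) :=
  -- hits = [line.split()[0] for line in log_entries if '401' in line or 'Invalid credentials' in line]
  let hits : List String := (log_entries.filter pvIsFailed).map pvFirstToken
  -- for ip in sorted(hits): … run scan (accumulator reversed, see pvRun)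
  let runsRev : List (String × Int) :=
    (PySem.List.sorted hits (fun x => x)).foldl pvRun []
  -- counts = dict(runs)
  let counts : PySem.Dict String Int := PySem.Dict.ofList runsRev.reverse
  -- for ip in hits: if ip not in out and counts[ip] > threshold: out[ip] = counts[ip]
  -- (counts[ip] ported as getD ip 0: ip ∈ hits, so the key is always present and no KeyError occurs)
  (hits.foldl
      (fun out ip =>
        if out.contains ip = false ∧ counts.getD ip 0 > threshold
        then out.insert ip (counts.getD ip 0) else out)
      (PySem.Dict.empty : PySem.Dict String Int)).items

-- ===== PRECONDITION & SPEC =====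
def Spec_detect_suspicious_activity (log_entries : List String) (threshold : Int) (out : List (String × Int)) : Prop := out = detect_suspicious_activity_alt log_entries threshold
instance (log_entries : List String) (threshold : Int) (out : List (String × Int)) : Decidable (Spec_detect_suspicious_activity log_entries threshold out) := by unfold Spec_detect_suspicious_activity; infer_instance

-- ===== CLAIM (what is proved, stated in full; the proofs are below) =====
def Claim_equal_detect_suspicious_activity : Prop := ∀ (log_entries : List String) (threshold : Int), Dom_detect_suspicious_activity log_entries threshold → Spec_detect_suspicious_activity log_entries threshold (detect_suspicious_activity log_entries threshold)

-- ===== LEMMAS AND PROOFS =====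

theorem pv_items_empty : (PySem.Dict.empty : PySem.Dict String Int).items = [] := rfl

-- a guarded foldl is a foldl over the filtered, mapped list
theorem pv_foldl_if {α β γ : Type} (l : List α) (p : α → Bool) (f : α → β)
    (g : γ → β → γ) (init : γ) :
    l.foldl (fun acc x => if p x then g acc (f x) else acc) init
      = ((l.filter p).map f).foldl g init := by
  induction l generalizing init with
  | nil => rfl
  | cons x xs ih => by_cases h : p x <;> simp [List.foldl, h, ih]

-- the run scan never digs below a nonempty prefix of its accumulator
theorem pvRun_acc (t : List String) (a r : List (String × Int)) (ha : a ≠ []) :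
    t.foldl pvRun (a ++ r) = t.foldl pvRun a ++ r := by
  induction t generalizing a with
  | nil => rfl
  | cons ip t' ih =>
    obtain ⟨⟨p, c⟩, a', rfl⟩ : ∃ x a', a = x :: a' := by
      cases a with | nil => exact absurd rfl ha | cons x a' => exact ⟨x, a', rfl⟩
    by_cases h : p = ip
    · simpa [List.foldl, pvRun, h] using ih ((p, c + 1) :: a') (by simp)
    · simpa [List.foldl, pvRun, h] using ih ((ip, 1) :: (p, c) :: a') (by simp)

-- a run of n equal elements only bumps the head counter
theorem pvRun_replicate (n : Nat) (ip : String) (c : Int) :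
    (List.replicate n ip).foldl pvRun [(ip, c)] = [(ip, c + n)] := by
  induction n generalizing c with
  | zero => simp
  | succ m ih =>
    rw [List.replicate_succ, List.foldl_cons]
    have h0 : pvRun [(ip, c)] ip = [(ip, c + 1)] := by simp [pvRun]
    rw [h0, ih (c + 1)]; push_cast; ring_nf

-- folding Set.add over a run of x from {x} stays {x}
theorem pv_add_replicate (k : Nat) (x : String) :
    (List.replicate k x).foldl PySem.Set.add [x] = [x] := by
  induction k with
  | zero => rfl
  | succ j ihj =>
    rw [List.replicate_succ, List.foldl_cons]
    show (List.replicate j x).foldl PySem.Set.add (PySem.Set.add [x] x) = [x]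
    rw [PySem.Set.add, if_pos (by simp [PySem.Set.contains])]
    exact ihj

-- Set.add-folding past an element not occurring later
theorem pv_add_foldl_cons (t : List String) (acc : List String) (x : String) (hx : x ∉ t) :
    t.foldl PySem.Set.add (x :: acc) = x :: t.foldl PySem.Set.add acc := by
  induction t generalizing acc with
  | nil => rfl
  | cons z t' ih =>
    have hzx : z ≠ x := fun h => hx (h ▸ List.mem_cons_self)
    have hc : PySem.Set.contains (x :: acc) z = PySem.Set.contains acc z := by
      simp [PySem.Set.contains]
      exact fun h => absurd h hzx
    rw [List.foldl_cons, List.foldl_cons]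
    show t'.foldl _ (PySem.Set.add (x :: acc) z) = x :: t'.foldl _ (PySem.Set.add acc z)
    rcases hb : PySem.Set.contains acc z with _ | _
    · rw [PySem.Set.add, PySem.Set.add, hc, hb]
      simp only [Bool.false_eq_true, if_false]
      show t'.foldl _ (x :: (acc ++ [z])) = _
      exact ih (acc ++ [z]) (fun hm => hx (List.mem_cons_of_mem z hm))
    · rw [PySem.Set.add, PySem.Set.add, hc, hb, if_pos rfl, if_pos rfl]
      exact ih acc (fun hm => hx (List.mem_cons_of_mem z hm))

-- in a ≤-sorted list, the head's duplicates are all in the leading run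
theorem pv_not_mem_dropWhile (s : List String) (hs : List.Pairwise (· ≤ ·) s) (x : String)
    (hall : ∀ y ∈ s, x ≤ y) : x ∉ s.dropWhile (fun y => y == x) := by
  induction s with
  | nil => simp
  | cons y s' ih =>
    by_cases h : (y == x) = true
    · rw [List.dropWhile_cons, if_pos h]
      exact ih hs.of_cons (fun z hz => hall z (List.mem_cons_of_mem y hz))
    · rw [List.dropWhile_cons, if_neg h]
      intro hmem
      rcases List.mem_cons.mp hmem with h1 | h2
      · exact h (by simp [h1])
      · have h3 : y ≤ x := (List.pairwise_cons.mp hs).1 x h2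
        have h4 : x ≤ y := hall y List.mem_cons_self
        exact h (by simp [le_antisymm h3 h4])

-- the run scan of a sorted list yields (distinct ip, its count), reversed
theorem pvRun_sorted : ∀ (n : Nat) (s : List String), s.length ≤ n →
    List.Pairwise (· ≤ ·) s →
    s.foldl pvRun [] = ((PySem.Set.ofList s).map (fun k => (k, (s.count k : Int)))).reverse := by
  intro n
  induction n with
  | zero => intro s hlen _; rw [List.length_eq_zero_iff.mp (Nat.le_zero.mp hlen)]; rfl
  | succ m ih =>
    intro s hlen hs
    cases hx : s with
    | nil => rfl
    | cons x s' =>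
      subst hx
      set tk := (x :: s').takeWhile (fun y => y == x) with htk
      set t := (x :: s').dropWhile (fun y => y == x) with ht
      have hsplit : tk ++ t = x :: s' := List.takeWhile_append_dropWhile
      have hall : ∀ y ∈ x :: s', x ≤ y := by
        intro y hy
        rcases List.mem_cons.mp hy with h | h
        · exact le_of_eq h.symm
        · exact (List.pairwise_cons.mp hs).1 y h
      have hxt : x ∉ t := pv_not_mem_dropWhile _ hs x hall
      have htkrep : tk = List.replicate tk.length x := by
        apply List.eq_replicate_of_mem
        intro y hy
        have := List.mem_takeWhile_imp (htk ▸ hy)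
        exact eq_of_beq this
      have htkpos : 0 < tk.length := by
        rw [htk, List.takeWhile_cons, if_pos (by simp)]; simp
      have hts : List.Pairwise (· ≤ ·) t := hs.sublist (ht ▸ List.dropWhile_sublist _)
      have htlen : t.length ≤ m := by
        have : tk.length + t.length = (x :: s').length := by
          rw [← List.length_append, hsplit]
        simp only [List.length_cons] at this hlen
        omega
      have hcount : (x :: s').count x = tk.length := by
        rw [← hsplit, List.count_append, htkrep]
        simp [List.count_eq_zero.mpr hxt]
      -- LHS
      have hfold : (x :: s').foldl pvRun [] = t.foldl pvRun [] ++ [(x, (tk.length : Int))] := by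
        rw [← hsplit, List.foldl_append]
        have h1 : tk.foldl pvRun [] = [(x, (tk.length : Int))] := by
          conv_lhs => rw [htkrep]
          obtain ⟨k, hk⟩ : ∃ k, tk.length = k + 1 := ⟨tk.length - 1, by omega⟩
          rw [hk, List.replicate_succ, List.foldl_cons]
          show (List.replicate k x).foldl pvRun [(x, 1)] = _
          rw [pvRun_replicate]; norm_num [hk]; ring
        rw [h1]
        cases hts0 : t with
        | nil => rfl
        | cons z t₂ =>
          have hzx : z ≠ x := fun h => hxt (hts0 ▸ h ▸ List.mem_cons_self)
          rw [List.foldl_cons]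
          show t₂.foldl pvRun (pvRun [(x, (tk.length : Int))] z) = _
          rw [pvRun, if_neg (Ne.symm hzx)]
          have := pvRun_acc t₂ [(z, 1)] [(x, (tk.length : Int))] (by simp)
          simp only [List.singleton_append] at this
          rw [this, List.foldl_cons]
          rfl
      -- RHS set decomposition
      have hofl : PySem.Set.ofList (x :: s') = x :: PySem.Set.ofList t := by
        rw [PySem.Set.ofList_eq_foldl, PySem.Set.ofList_eq_foldl, ← hsplit, List.foldl_append]
        have h1 : tk.foldl PySem.Set.add [] = [x] := by
          conv_lhs => rw [htkrep]
          obtain ⟨k, hk⟩ : ∃ k, tk.length = k + 1 := ⟨tk.length - 1, by omega⟩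
          rw [hk, List.replicate_succ, List.foldl_cons]
          show (List.replicate k x).foldl PySem.Set.add [x] = [x]
          exact pv_add_replicate k x
        rw [h1]
        exact pv_add_foldl_cons t [] x hxt
      -- counts agree on the tail's elements
      have hmapc : (PySem.Set.ofList t).map (fun k => (k, ((x :: s').count k : Int)))
          = (PySem.Set.ofList t).map (fun k => (k, (t.count k : Int))) := by
        apply List.map_congr_left
        intro k hk
        have hkt : k ∈ t := (PySem.Set.mem_ofList t k).mp hk
        have hkx : k ≠ x := fun h => hxt (h ▸ hkt)
        have : (x :: s').count k = t.count k := by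
          rw [← hsplit, List.count_append, htkrep, List.count_replicate]
          simp [Ne.symm hkx]
        rw [this]
      rw [hfold, ih t htlen hts, hofl, List.map_cons, List.reverse_cons, hmapc, hcount]

-- looking up any collected ip in dict(runs) gives its count among the hits
theorem pv_counts_getD (hits : List String) (k : String) (hk : k ∈ hits) :
    (PySem.Dict.ofList (((PySem.List.sorted hits (fun x => x)).foldl pvRun []).reverse)).getD k 0
      = (hits.count k : Int) := by
  set s := PySem.List.sorted hits (fun x => x) with hsdef
  have hperm : s.Perm hits := PySem.List.sorted_perm hits (fun x => x) false
  have hrun := pvRun_sorted s.length s le_rfl (PySem.List.sorted_pairwise hits (fun x => x))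
  rw [hrun, List.reverse_reverse]
  set ps := (PySem.Set.ofList s).map (fun k => (k, (s.count k : Int))) with hps
  have hitems : (PySem.Dict.ofList ps).items = ps := by
    rw [PySem.Dict.ofList, PySem.Dict.update, hps]
    have := PySem.Dict.items_foldl_insert_fresh (κ := String) (ν := Int)
        (PySem.Set.ofList s) (fun k => k) (fun k => (s.count k : Int)) PySem.Dict.empty
        (fun a _ => by simp [PySem.Dict.contains_empty]) (by simpa using PySem.Set.nodup_ofList s)
    simpa [List.foldl_map, pv_items_empty] using this
  have hkeys : (PySem.Dict.ofList ps).keys.Nodup := by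
    rw [PySem.Dict.keys, hitems, hps, List.map_map]
    simpa [Function.comp_def] using PySem.Set.nodup_ofList s
  have hmem : (k, (s.count k : Int)) ∈ (PySem.Dict.ofList ps).items := by
    rw [hitems, hps]
    exact List.mem_map_of_mem ((PySem.Set.mem_ofList s k).mpr ((hperm.mem_iff).mpr hk))
  rw [PySem.Dict.getD_of_mem_items _ hmem hkeys, hperm.count_eq]

-- the stage-3 loop builds exactly the filtered first-occurrence dict
theorem pv_out_loop (f : String → Int) (th : Int) :
    ∀ (l : List String) (s0 : List String) (d : PySem.Dict String Int), s0.Nodup →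
    d.items = (s0.filter (fun k => decide (f k > th))).map (fun k => (k, f k)) →
    (l.foldl (fun out ip =>
        if out.contains ip = false ∧ f ip > th then out.insert ip (f ip) else out) d).items
      = ((l.foldl PySem.Set.add s0).filter (fun k => decide (f k > th))).map (fun k => (k, f k)) := by
  intro l
  induction l with
  | nil => intro s0 d _ h; simpa using h
  | cons ip l' ih =>
    intro s0 d hnd hd
    rw [List.foldl_cons, List.foldl_cons]
    have hcont : d.contains ip = true ↔ (ip ∈ s0 ∧ f ip > th) := by
      rw [PySem.Dict.contains_iff_mem_keys, PySem.Dict.keys, hd, List.map_map]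
      simp [Function.comp_def, List.mem_filter]
    by_cases hmem : ip ∈ s0
    · have hadd : PySem.Set.add s0 ip = s0 := by
        rw [PySem.Set.add, if_pos (by simpa [PySem.Set.contains, List.contains_iff_mem] using hmem)]
      rw [hadd]
      by_cases hp : f ip > th
      · rw [if_neg (by simp [hcont.mpr ⟨hmem, hp⟩])]
        exact ih s0 d hnd hd
      · rw [if_neg (by tauto)]
        exact ih s0 d hnd hd
    · have hadd : PySem.Set.add s0 ip = s0 ++ [ip] := by
        rw [PySem.Set.add, if_neg (by simpa [PySem.Set.contains, List.contains_iff_mem] using hmem)]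
      have hcf : d.contains ip = false := by
        rcases Bool.eq_false_or_eq_true (d.contains ip) with h | h
        · exact absurd (hcont.mp h).1 hmem
        · exact h
      have hnd' : (s0 ++ [ip]).Nodup := by
        simpa [List.nodup_append] using ⟨hnd, fun a ha h => hmem (h ▸ ha)⟩
      rw [hadd]
      by_cases hp : f ip > th
      · rw [if_pos ⟨hcf, hp⟩]
        apply ih (s0 ++ [ip]) _ hnd'
        rw [PySem.Dict.items_insert_of_not_contains d _ hcf, hd, List.filter_append,
            List.map_append]
        simp [hp]
      · rw [if_neg (by tauto)]
        apply ih (s0 ++ [ip]) _ hnd'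
        rw [hd, List.filter_append]
        simp [hp]

-- ===== VERDICT (by name: the statement is the Claim_ definition above) =====
theorem detect_suspicious_activity_spec : Claim_equal_detect_suspicious_activity := by
  intro log_entries threshold _
  unfold Spec_detect_suspicious_activity detect_suspicious_activity detect_suspicious_activity_alt
  set hits : List String := (log_entries.filter pvIsFailed).map pvFirstToken with hhits
  -- A's first loop is Counter(hits)
  have hA1 : log_entries.foldl
      (fun d line => if pvIsFailed line then d.modify (pvFirstToken line) 0 (· + 1) else d)
      PySem.Dict.empty = PySem.Dict.counter hits := by
    rw [pv_foldl_if log_entries pvIsFailed pvFirstToken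
          (fun (d : PySem.Dict String Int) x => d.modify x 0 (· + 1)) PySem.Dict.empty,
        PySem.Dict.counter_eq_foldl]
  rw [hA1]
  -- A's second loop over Counter.items filters and reinserts fresh distinct keys
  have hA2 : ((PySem.Dict.counter hits).items.foldl
      (fun (r : PySem.Dict String Int) p => if p.2 > threshold then r.insert p.1 p.2 else r)
      PySem.Dict.empty).items
      = ((PySem.Set.ofList hits).filter (fun k => decide ((hits.count k : Int) > threshold))).map
          (fun k => (k, (hits.count k : Int))) := by
    have h1 := pv_foldl_if (PySem.Dict.counter hits).items (fun p => decide (p.2 > threshold)) id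
        (fun (r : PySem.Dict String Int) p => r.insert p.1 p.2) PySem.Dict.empty
    simp only [decide_eq_true_eq, id_eq, List.map_id] at h1
    rw [h1, PySem.Dict.items_counter, List.filter_map]
    have h2 : (List.filter ((fun p : String × Int => decide (p.2 > threshold)) ∘
          (fun k => (k, (hits.count k : Int)))) (PySem.Set.ofList hits))
        = (PySem.Set.ofList hits).filter (fun k => decide ((hits.count k : Int) > threshold)) := rfl
    rw [h2]
    set kf := (PySem.Set.ofList hits).filter
        (fun k => decide ((hits.count k : Int) > threshold)) with hkf
    have hnd : kf.Nodup := (PySem.Set.nodup_ofList hits).filter _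
    have := PySem.Dict.items_foldl_insert_fresh (κ := String) (ν := Int)
        (kf.map (fun k => (k, (hits.count k : Int)))) Prod.fst Prod.snd PySem.Dict.empty
        (fun a _ => by simp [PySem.Dict.contains_empty])
        (by simpa [List.map_map, Function.comp_def] using hnd)
    simpa [List.foldl_map, List.map_map, Function.comp_def, pv_items_empty] using this
  rw [hA2]
  -- B's stage-3 loop gives the same filtered first-occurrence dict
  set counts : PySem.Dict String Int :=
    PySem.Dict.ofList (((PySem.List.sorted hits (fun x => x)).foldl pvRun []).reverse) with hcounts
  have hB := pv_out_loop (fun ip => counts.getD ip 0) threshold hits [] PySem.Dict.empty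
      List.nodup_nil (by simp [pv_items_empty])
  rw [hB, ← PySem.Set.ofList_eq_foldl]
  -- counts.getD k 0 = hits.count k on every member of Set.ofList hits
  have hfc : ∀ k ∈ PySem.Set.ofList hits, counts.getD k 0 = (hits.count k : Int) := by
    intro k hk
    exact pv_counts_getD hits k ((PySem.Set.mem_ofList hits k).mp hk)
  have h3 : ((PySem.Set.ofList hits).filter
        (fun k => decide ((fun ip => counts.getD ip 0) k > threshold)))
      = (PySem.Set.ofList hits).filter
        (fun k => decide ((hits.count k : Int) > threshold)) :=
    List.filter_congr (fun k hk => by simp only [hfc k hk])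
  rw [h3]
  apply List.map_congr_left
  intro k hk
  simp only [hfc k (List.mem_of_mem_filter hk)]
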